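-- pv_equiv track=rewrite | github.com/blegloannec/CodeProblems | CodinGame/Community/binary_sequence.py | get_bit
-- ===== SOURCE A (Python) =====
-- def get_bit(i):
--     if i == 0:
--         return 0
--     i -= 1
--     k = 1
--     while k<<(k-1) <= i:
--         i -= k<<(k-1)
--         k += 1
--     q, r = divmod(i, k)
--     n = (1<<(k-1)) | q
--     b = (n>>(k-1-r)) & 1
--     return b
-- ===== SOURCE B (Python) =====
-- def _f(k):
--     # bits occupied by all binary numbers of width < k (k >= 1):
--     # sum_{w<k} w*2^(w-1) = (k-2)*2^(k-1) + 1
--     return (k - 2) * (1 << (k - 1)) + 1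
--
--
-- def get_bit(i):
--     if i == 0:
--         return 0
--     j = i - 1
--     # binary search the largest k in [1, 64) with _f(k) <= j
--     lo, hi = 1, 64
--     while lo + 1 < hi:
--         mid = (lo + hi) // 2
--         if _f(mid) <= j:
--             lo = mid
--         else:
--             hi = mid
--     k = lo
--     q, r = divmod(j - _f(k), k)
--     n = (1 << (k - 1)) | q
--     return (n >> (k - 1 - r)) & 1
-- ===== Notes on version B (the rewrite author's own statement) =====
-- stated objective: alternative
-- what changed: B replaces A's block-by-block repeated-subtraction loop by a closed-form cumulative-bit-count formula plus a binary search for the block width, then reads the bit off with one divmod.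
import Mathlib
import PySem

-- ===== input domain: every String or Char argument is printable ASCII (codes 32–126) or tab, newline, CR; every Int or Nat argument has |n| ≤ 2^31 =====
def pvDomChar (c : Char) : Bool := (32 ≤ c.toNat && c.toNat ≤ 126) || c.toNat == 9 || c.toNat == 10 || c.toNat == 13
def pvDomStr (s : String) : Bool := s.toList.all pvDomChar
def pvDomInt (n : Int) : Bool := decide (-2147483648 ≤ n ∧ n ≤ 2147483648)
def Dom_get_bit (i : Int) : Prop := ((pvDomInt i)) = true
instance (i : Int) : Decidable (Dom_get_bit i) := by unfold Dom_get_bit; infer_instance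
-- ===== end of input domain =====

-- B replaces A's block-by-block repeated-subtraction loop by the closed-form cumulative-bit
-- count f(k) = (k-2)*2^(k-1)+1 plus a binary search for the block width k (objective: alternative).

-- ===== PORT A =====
-- the while loop: while k<<(k-1) <= i: i -= k<<(k-1); k += 1
-- (fuel 64 is a pure termination guard: on |i| ≤ 2^31 the loop runs at most 27 times)
def getBitLoopA : Nat → Int → Int → Int × Int
  | 0, i, k => (i, k)
  | fuel + 1, i, k =>
    if k <<< (k - 1).toNat ≤ i then
      getBitLoopA fuel (i - k <<< (k - 1).toNat) (k + 1)
    else (i, k)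

def get_bit (i : Int) : Int :=
  if i = 0 then 0
  else
    let p := getBitLoopA 64 (i - 1) 1
    let i2 := p.1
    let k := p.2
    -- q, r = divmod(i, k): k ≥ 1 always here, so divmod cannot raise; ported as floordiv/mod
    let q := PySem.Int.floordiv i2 k
    let r := PySem.Int.mod i2 k
    let n := PySem.Int.bor ((1 : Int) <<< (k - 1).toNat) q
    PySem.Int.band (n >>> (k - 1 - r).toNat) 1

-- ===== PORT B =====
-- _f(k) = (k-2)*(1<<(k-1)) + 1
def getBitF (k : Int) : Int := (k - 2) * ((1 : Int) <<< (k - 1).toNat) + 1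

-- the binary-search loop: while lo+1 < hi: mid = (lo+hi)//2; …
-- (fuel 8 is a pure termination guard: hi-lo = 63 halves each step, ≤ 6 iterations)
def getBitBS : Nat → Int → Int → Int → Int
  | 0, lo, _, _ => lo
  | fuel + 1, lo, hi, j =>
    if lo + 1 < hi then
      let mid := PySem.Int.floordiv (lo + hi) 2
      if getBitF mid ≤ j then getBitBS fuel mid hi j else getBitBS fuel lo mid j
    else lo

def get_bit_alt (i : Int) : Int :=
  if i = 0 then 0
  else
    let j := i - 1
    let k := getBitBS 8 1 64 j
    let off := j - getBitF k
    -- q, r = divmod(j - _f(k), k): k ≥ 1 always here, so divmod cannot raise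
    let q := PySem.Int.floordiv off k
    let r := PySem.Int.mod off k
    let n := PySem.Int.bor ((1 : Int) <<< (k - 1).toNat) q
    PySem.Int.band (n >>> (k - 1 - r).toNat) 1

-- ===== PRECONDITION & SPEC =====
def Spec_get_bit (i : Int) (out : Int) : Prop := out = get_bit_alt i
instance (i : Int) (out : Int) : Decidable (Spec_get_bit i out) := by unfold Spec_get_bit; infer_instance

-- ===== CLAIM (what is proved, stated in full; the proofs are below) =====
def Claim_equal_get_bit : Prop := ∀ (i : Int), Dom_get_bit i → Spec_get_bit i (get_bit i)


-- ===== LEMMAS AND PROOFS =====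

theorem getBit_shl_eq (a : Int) (n : Nat) : a <<< n = a * 2 ^ n := by
  rw [Int.shiftLeft_eq']; push_cast; ring

theorem getBitF_step (k : Int) (hk : 1 ≤ k) :
    getBitF (k + 1) - getBitF k = k * 2 ^ (k - 1).toNat := by
  have ht : (k + 1 - 1).toNat = (k - 1).toNat + 1 := by omega
  simp only [getBitF, getBit_shl_eq, ht, one_mul]
  have h2 : (2 : Int) ^ ((k - 1).toNat + 1) = 2 ^ (k - 1).toNat * 2 := by ring
  rw [h2]; ring

theorem getBitF_mono (n : Nat) (k : Int) (hk : 1 ≤ k) :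
    getBitF k ≤ getBitF (k + n) := by
  induction n with
  | zero => simp
  | succ m ih =>
    have h1 : (1 : Int) ≤ k + m := by omega
    have hs := getBitF_step (k + m) h1
    have hp : (0 : Int) ≤ (k + m) * 2 ^ (k + (m : Int) - 1).toNat := by positivity
    have he : k + ((m + 1 : Nat) : Int) = k + (m : Int) + 1 := by push_cast; ring
    rw [he]; omega

theorem getBitLoopA_spec (steps : Nat) :
    ∀ (fuel : Nat) (k j : Int), 1 ≤ k → steps + 1 ≤ fuel →
    (steps = 0 ∨ getBitF (k + steps) - getBitF k ≤ j) →
    j < getBitF (k + steps + 1) - getBitF k →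
    getBitLoopA fuel j k = (j - (getBitF (k + steps) - getBitF k), k + steps) := by
  induction steps with
  | zero =>
    intro fuel k j hk hfuel _ hub
    obtain ⟨f, rfl⟩ : ∃ f, fuel = f + 1 := ⟨fuel - 1, by omega⟩
    have hs := getBitF_step k hk
    simp only [Nat.cast_zero, add_zero] at hub ⊢
    have hc : ¬ (k <<< (k - 1).toNat ≤ j) := by
      rw [getBit_shl_eq]; omega
    simp only [getBitLoopA, if_neg hc, sub_self, sub_zero]
  | succ s ih =>
    intro fuel k j hk hfuel hlb hub
    obtain ⟨f, rfl⟩ : ∃ f, fuel = f + 1 := ⟨fuel - 1, by omega⟩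
    have hs := getBitF_step k hk
    have he1 : k + ((s + 1 : Nat) : Int) = k + 1 + (s : Int) := by push_cast; ring
    have hmono : getBitF (k + 1) ≤ getBitF (k + ((s + 1 : Nat) : Int)) := by
      have hm := getBitF_mono s (k + 1) (by omega)
      rw [he1]; exact hm
    have hlb' : getBitF (k + ((s + 1 : Nat) : Int)) - getBitF k ≤ j := by
      rcases hlb with h | h
      · omega
      · exact h
    have hc : k <<< (k - 1).toNat ≤ j := by
      rw [getBit_shl_eq]; omega
    have he2 : k + 1 + (s : Int) = k + ((s + 1 : Nat) : Int) := by push_cast; ring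
    have hrec := ih f (k + 1) (j - k <<< (k - 1).toNat) (by omega) (by omega)
      (by
        rcases Nat.eq_zero_or_pos s with h0 | hpos
        · exact Or.inl h0
        · right
          rw [getBit_shl_eq, he2]
          omega)
      (by
        rw [getBit_shl_eq]
        have he3 : k + 1 + (s : Int) + 1 = k + ((s + 1 : Nat) : Int) + 1 := by push_cast; ring
        rw [he3]
        omega)
    simp only [getBitLoopA, if_pos hc, hrec]
    rw [getBit_shl_eq, he2]
    refine Prod.ext ?_ (by rfl)
    simp only
    omega

theorem getBitBS_succ (f : Nat) (lo hi j : Int) :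
    getBitBS (f + 1) lo hi j =
      if lo + 1 < hi then
        (if getBitF (PySem.Int.floordiv (lo + hi) 2) ≤ j then
           getBitBS f (PySem.Int.floordiv (lo + hi) 2) hi j
         else getBitBS f lo (PySem.Int.floordiv (lo + hi) 2) j)
      else lo := rfl

-- binary-search invariant: result k satisfies 1 ≤ k < hi, (k = 1 ∨ F k ≤ j), j < F (k+1)
theorem getBitBS_spec (fuel : Nat) :
    ∀ (lo hi j : Int), 1 ≤ lo → lo < hi → hi - lo ≤ 2 ^ fuel →
    (lo = 1 ∨ getBitF lo ≤ j) → j < getBitF hi →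
    1 ≤ getBitBS fuel lo hi j ∧ getBitBS fuel lo hi j < hi ∧
    (getBitBS fuel lo hi j = 1 ∨ getBitF (getBitBS fuel lo hi j) ≤ j) ∧
    j < getBitF (getBitBS fuel lo hi j + 1) := by
  induction fuel with
  | zero =>
    intro lo hi j h1 h2 hlen hlb hub
    have he : hi = lo + 1 := by omega
    subst he
    simp only [getBitBS]
    exact ⟨h1, by omega, hlb, hub⟩
  | succ f ih =>
    intro lo hi j h1 h2 hlen hlb hub
    by_cases hc : lo + 1 < hi
    · have hmid1 : lo + 1 ≤ PySem.Int.floordiv (lo + hi) 2 := by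
        rw [PySem.Int.le_floordiv_iff_mul_le (by omega)]; omega
      have hmid2 : PySem.Int.floordiv (lo + hi) 2 < hi := by
        rw [PySem.Int.floordiv_lt_iff_lt_mul (by omega)]; omega
      have h2f : (2 : Int) ^ (f + 1) = 2 ^ f * 2 := by ring
      have hdp : (0 : Int) < 2 ^ f := by positivity
      have hmidle : PySem.Int.floordiv (lo + hi) 2 * 2 ≤ lo + hi := by
        have hq := PySem.Int.floordiv_mul_add_mod (lo + hi) 2
        have := PySem.Int.mod_nonneg (lo + hi) (b := 2) (by omega)
        omega
      have hmidgt : lo + hi < (PySem.Int.floordiv (lo + hi) 2 + 1) * 2 := by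
        have hq := PySem.Int.floordiv_mul_add_mod (lo + hi) 2
        have := PySem.Int.mod_lt (lo + hi) (b := 2) (by omega)
        omega
      by_cases hF : getBitF (PySem.Int.floordiv (lo + hi) 2) ≤ j
      · have hres := ih (PySem.Int.floordiv (lo + hi) 2) hi j (by omega) hmid2
          (by rw [h2f] at hlen; omega) (Or.inr hF) hub
        rw [getBitBS_succ, if_pos hc, if_pos hF]
        exact hres
      · have hres := ih lo (PySem.Int.floordiv (lo + hi) 2) j h1 (by omega)
          (by rw [h2f] at hlen; omega)
          hlb (by omega)
        rw [getBitBS_succ, if_pos hc, if_neg hF]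
        exact ⟨hres.1, by have := hres.2.1; omega, hres.2.2⟩
    · have he : hi = lo + 1 := by omega
      subst he
      rw [getBitBS_succ, if_neg hc]
      exact ⟨h1, by omega, hlb, hub⟩

-- the two programs compute the same (offset, width) pair
theorem loop_eq_search (j : Int) (hj : j ≤ 2147483647) :
    getBitLoopA 64 j 1 = (j - getBitF (getBitBS 8 1 64 j), getBitBS 8 1 64 j) := by
  have hub : j < getBitF 64 := by
    have h64 : getBitF 64 = 571849066284996100097 := by decide
    omega
  obtain ⟨h1, h2, h3, h4⟩ := getBitBS_spec 8 1 64 j (by omega) (by omega) (by norm_num) (Or.inl rfl) hub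
  set k := getBitBS 8 1 64 j with hkdef
  have hF1 : getBitF 1 = 0 := by decide
  have hk28 : k < 28 := by
    by_contra hge
    have hmono := getBitF_mono (k - 28).toNat 28 (by norm_num)
    have he : (28 : Int) + ((k - 28).toNat : Int) = k := by omega
    rw [he] at hmono
    have h28 : getBitF 28 = 3489660929 := by decide
    rcases h3 with h | h
    · omega
    · omega
  have hmain := getBitLoopA_spec (k - 1).toNat 64 1 j (by omega) (by omega)
    (by
      rcases h3 with h | h
      · left; omega
      · by_cases hk1 : k = 1
        · left; omega
        · right
          have he : (1 : Int) + ((k - 1).toNat : Int) = k := by omega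
          rw [he, hF1]; omega)
    (by
      have he : (1 : Int) + ((k - 1).toNat : Int) + 1 = k + 1 := by omega
      rw [he, hF1]; omega)
  have he : (1 : Int) + ((k - 1).toNat : Int) = k := by omega
  rw [he, hF1] at hmain
  simpa using hmain

-- ===== VERDICT (by name: the statement is the Claim_ definition above) =====
theorem get_bit_spec : Claim_equal_get_bit := by
  intro i hdom
  unfold Spec_get_bit get_bit get_bit_alt
  by_cases h0 : i = 0
  · simp [h0]
  · simp only [if_neg h0]
    have hdom' : i ≤ 2147483648 := by
      simp only [Dom_get_bit, pvDomInt, decide_eq_true_eq] at hdom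
      omega
    rw [loop_eq_search (i - 1) (by omega)]
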